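-- pv_equiv track=rewrite | github.com/insomnes/pyaoc | src/pyaoc/y_2025/d_10.py | _find_joltage_jolt_buttons
-- ===== SOURCE A (Python) =====
-- def _find_joltage_jolt_buttons(
--     jolts: list[int], buttons: list[tuple[int, ...]]
-- ) -> list[list[tuple[int, ...]]]:
--     # indexes of buttons that can increase each jolt
--     jolts_buttons: list[list[tuple[int, ...]]] = [[] for _ in jolts]
--     for jolt_idx, _ in enumerate(jolts):
--         j_buttons = [btn for i, btn in enumerate(buttons) if jolt_idx in btn]
--         jolts_buttons[jolt_idx] = j_buttons
--     return jolts_buttons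
-- ===== SOURCE B (Python) =====
-- def _find_joltage_jolt_buttons(
--     jolts: list[int], buttons: list[tuple[int, ...]]
-- ) -> list[list[tuple[int, ...]]]:
--     # One pass over the buttons: each button is appended to every jolt index it contains.
--     n = len(jolts)
--     res = [[] for _ in jolts]
--     for btn in buttons:
--         for j in dict.fromkeys(btn):  # distinct jolt indexes of this button, in order
--             if 0 <= j < n:
--                 res[j].append(btn)
--     return res
-- ===== Notes on version B (the rewrite author's own statement) =====
-- stated objective: faster
-- what changed: Inverted the loop structure: instead of scanning the whole button list once per jolt index, B makes a single pass over the buttons and appends each button to every in-range jolt index it contains (deduplicated per button).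
import Mathlib
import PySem

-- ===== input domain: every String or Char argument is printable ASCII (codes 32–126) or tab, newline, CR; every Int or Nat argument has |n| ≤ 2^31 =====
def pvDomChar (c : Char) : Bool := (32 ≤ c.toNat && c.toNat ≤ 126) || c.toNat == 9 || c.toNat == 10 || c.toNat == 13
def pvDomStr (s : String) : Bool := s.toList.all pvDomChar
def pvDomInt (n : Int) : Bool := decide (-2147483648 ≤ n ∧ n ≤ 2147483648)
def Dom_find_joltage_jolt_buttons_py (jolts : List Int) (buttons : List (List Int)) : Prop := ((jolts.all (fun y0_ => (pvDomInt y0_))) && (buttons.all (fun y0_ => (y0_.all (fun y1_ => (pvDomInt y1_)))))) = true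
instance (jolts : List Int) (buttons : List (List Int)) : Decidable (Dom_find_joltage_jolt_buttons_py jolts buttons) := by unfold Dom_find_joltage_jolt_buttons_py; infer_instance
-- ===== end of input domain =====

-- B inverts A's loop structure: one pass over the buttons appending each button to the
-- jolt indexes it contains (deduplicated per button), instead of one scan of all buttons
-- per jolt index (objective: faster, asymptotic).

-- ===== PORT A =====
-- j_buttons = [btn for i, btn in enumerate(buttons) if jolt_idx in btn]
def pvAInner (buttons : List (List Int)) (joltIdx : Int) : List (List Int) :=
  ((PySem.List.enumerate buttons).filter (fun q => q.2.contains joltIdx)).map (·.2)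

def find_joltage_jolt_buttons_py (jolts : List Int) (buttons : List (List Int)) : List (List (List Int)) :=
  let joltsButtons : List (List (List Int)) := jolts.map (fun _ => [])
  (PySem.List.enumerate jolts).foldl
    (fun acc p => PySem.List.pySetD acc p.1 (pvAInner buttons p.1)) joltsButtons

-- ===== PORT B =====
def find_joltage_jolt_buttons_py_alt (jolts : List Int) (buttons : List (List Int)) : List (List (List Int)) :=
  let n : Nat := jolts.length
  let res : List (List (List Int)) := jolts.map (fun _ => [])
  buttons.foldl
    (fun res btn =>
      (PySem.List.dedup btn).foldl
        (fun r j => if 0 ≤ j ∧ j < (n : Int) then r.modify j.toNat (· ++ [btn]) else r) res)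
    res

-- ===== PRECONDITION & SPEC =====
def Spec_find_joltage_jolt_buttons_py (jolts : List Int) (buttons : List (List Int)) (out : List (List (List Int))) : Prop := out = find_joltage_jolt_buttons_py_alt jolts buttons
instance (jolts : List Int) (buttons : List (List Int)) (out : List (List (List Int))) : Decidable (Spec_find_joltage_jolt_buttons_py jolts buttons out) := by unfold Spec_find_joltage_jolt_buttons_py; infer_instance

-- ===== CLAIM (what is proved, stated in full; the proofs are below) =====
def Claim_equal_find_joltage_jolt_buttons_py : Prop := ∀ (jolts : List Int) (buttons : List (List Int)), Dom_find_joltage_jolt_buttons_py jolts buttons → Spec_find_joltage_jolt_buttons_py jolts buttons (find_joltage_jolt_buttons_py jolts buttons)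

-- ===== LEMMAS AND PROOFS =====

-- the comprehension over enumerate(buttons) is just a filter of buttons
theorem pvAInner_eq (buttons : List (List Int)) (j : Int) :
    pvAInner buttons j = buttons.filter (fun b => b.contains j) := by
  unfold pvAInner
  suffices h : ∀ (bs : List (List Int)) (s : Int),
      ((PySem.List.enumerate bs s).filter (fun q => q.2.contains j)).map (·.2)
        = bs.filter (fun b => b.contains j) by
    exact h buttons 0
  intro bs
  induction bs with
  | nil => intro s; simp [PySem.List.enumerate_nil]
  | cons b t ih =>
    intro s
    simp only [PySem.List.enumerate_cons, List.filter_cons]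
    by_cases hb : j ∈ b
    · simpa [hb] using ih (s + 1)
    · simpa [hb] using ih (s + 1)

-- A's fold: setting every index of the enumeration to g on a list of matching length
theorem pvA_fold {β : Type} (g : Int → β) :
    ∀ {α : Type} (js : List α) (s : Nat) (acc : List β), acc.length = s + js.length →
      (PySem.List.enumerate js (s : Int)).foldl
          (fun a p => PySem.List.pySetD a p.1 (g p.1)) acc
        = acc.take s ++ (List.range' s js.length).map (fun j : Nat => g (Int.ofNat j)) := by
  intro α js
  induction js with
  | nil =>
    intro s acc h
    simp only [PySem.List.enumerate_nil, List.foldl_nil, List.length_nil, List.range'_zero,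
      List.map_nil, List.append_nil]
    rw [List.take_of_length_le (by simp at h; omega)]
  | cons x t ih =>
    intro s acc h
    simp only [PySem.List.enumerate_cons, List.foldl_cons]
    have hs : ((s : Int) + 1) = ((s + 1 : Nat) : Int) := by push_cast; ring
    have hset : PySem.List.pySetD acc (s : Int) (g s) = acc.set s (g s) := by
      simp [PySem.List.pySetD_natCast]
    rw [hset, hs, ih (s + 1) (acc.set s (g s)) (by simp only [List.length_set, List.length_cons] at *; omega)]
    have hlt : s < acc.length := by simp at h; omega
    have htake : (acc.set s (g s)).take (s + 1) = acc.take s ++ [g (Int.ofNat s)] := by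
      apply List.ext_getElem?
      intro i
      rcases Nat.lt_trichotomy i s with hi | rfl | hi
      · rw [List.getElem?_take_of_lt (by omega), List.getElem?_set_ne (by omega),
          List.getElem?_append_left (by simp [List.length_take]; omega),
          List.getElem?_take_of_lt hi]
      · rw [List.getElem?_take_of_lt (Nat.lt_succ_self i),
          List.getElem?_set_self hlt,
          List.getElem?_append_right (by simp [List.length_take])]
        simp [List.length_take, Nat.min_eq_left (Nat.le_of_lt hlt)]
      · rw [List.getElem?_eq_none (by simp; omega), List.getElem?_eq_none (by simp; omega)]
    rw [htake, List.length_cons, List.range'_succ]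
    simp [List.append_assoc]

-- length is preserved by B's inner loop
theorem pvB_inner_len (btn : List Int) (n : Nat) :
    ∀ (S : List Int) (res : List (List (List Int))),
      (S.foldl (fun r j => if 0 ≤ j ∧ j < (n : Int) then r.modify j.toNat (· ++ [btn]) else r) res).length
        = res.length := by
  intro S
  induction S with
  | nil => intro res; rfl
  | cons j t ih =>
    intro res
    simp only [List.foldl_cons]
    rw [ih]
    split <;> simp

-- pointwise effect of B's inner loop over a duplicate-free index list
theorem pvB_inner (btn : List Int) (n : Nat) :
    ∀ (S : List Int), S.Nodup → ∀ (res : List (List (List Int))) (k : Nat),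
      (S.foldl (fun r j => if 0 ≤ j ∧ j < (n : Int) then r.modify j.toNat (· ++ [btn]) else r) res)[k]?
        = if (k : Int) ∈ S ∧ k < n then res[k]?.map (· ++ [btn]) else res[k]? := by
  intro S
  induction S with
  | nil => intro _ res k; simp
  | cons j t ih =>
    intro hnd res k
    have hnd' := hnd.of_cons
    have hjt : j ∉ t := (List.nodup_cons.mp hnd).1
    simp only [List.foldl_cons]
    by_cases hj : 0 ≤ j ∧ j < (n : Int)
    · rw [if_pos hj, ih hnd']
      by_cases hk : (k : Int) = j
      · have hkj : j.toNat = k := by omega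
        have hkt : (k : Int) ∉ t := by rw [hk]; exact hjt
        have hkn : k < n := by omega
        simp [hkn, hk, hkj]
        exact fun hc => absurd hc hjt
      · have hkj : ¬ (j.toNat = k) := by omega
        simp only [List.getElem?_modify, hkj]
        have : ((k : Int) ∈ j :: t ∧ k < n) ↔ ((k : Int) ∈ t ∧ k < n) := by
          simp [List.mem_cons, hk]
        rw [if_congr this rfl rfl]
        simp
    · rw [if_neg hj, ih hnd']
      by_cases hk : (k : Int) = j
      · have hkn : ¬ k < n := by omega
        have hkt : (k : Int) ∉ t := by rw [hk]; exact hjt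
        simp [hkt, hkn]
      · have : ((k : Int) ∈ j :: t ∧ k < n) ↔ ((k : Int) ∈ t ∧ k < n) := by
          simp [List.mem_cons, hk]
        rw [if_congr this rfl rfl]

-- pointwise effect of B's outer loop, for an in-range index
theorem pvB_outer (n : Nat) :
    ∀ (bs : List (List Int)) (res : List (List (List Int))) (k : Nat), k < n →
      (bs.foldl
          (fun res btn =>
            (PySem.List.dedup btn).foldl
              (fun r j => if 0 ≤ j ∧ j < (n : Int) then r.modify j.toNat (· ++ [btn]) else r) res)
          res)[k]?
        = res[k]?.map (· ++ bs.filter (fun b => b.contains (k : Int))) := by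
  intro bs
  induction bs with
  | nil => intro res k _; cases h : res[k]? <;> simp [h]
  | cons b t ih =>
    intro res k hk
    simp only [List.foldl_cons]
    rw [ih _ k hk, pvB_inner b n (PySem.List.dedup b) (PySem.List.nodup_dedup b) res k]
    by_cases hb : (k : Int) ∈ b
    · have hmem : (k : Int) ∈ PySem.List.dedup b := (PySem.List.mem_dedup b ((k:Int))).mpr hb
      have hbc : (fun b' => b'.contains (k : Int)) b = true := by
        simpa using hb
      rw [if_pos ⟨hmem, hk⟩]
      simp only [List.filter_cons, hbc]
      cases res[k]? <;> simp
    · have hmem : (k : Int) ∉ PySem.List.dedup b := fun h => hb ((PySem.List.mem_dedup b ((k:Int))).mp h)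
      have hbc : ¬ ((fun b' => b'.contains (k : Int)) b = true) := by simpa using hb
      rw [if_neg (fun h => hmem h.1)]
      simp only [List.filter_cons]
      rw [if_neg hbc]

-- length is preserved by B's outer loop
theorem pvB_outer_len (n : Nat) :
    ∀ (bs : List (List Int)) (res : List (List (List Int))),
      (bs.foldl
          (fun res btn =>
            (PySem.List.dedup btn).foldl
              (fun r j => if 0 ≤ j ∧ j < (n : Int) then r.modify j.toNat (· ++ [btn]) else r) res)
          res).length = res.length := by
  intro bs
  induction bs with
  | nil => intro res; rfl
  | cons b t ih => intro res; simp only [List.foldl_cons]; rw [ih, pvB_inner_len]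

-- ===== VERDICT (by name: the statement is the Claim_ definition above) =====
theorem find_joltage_jolt_buttons_py_spec : Claim_equal_find_joltage_jolt_buttons_py := by
  intro jolts buttons _
  show find_joltage_jolt_buttons_py jolts buttons = find_joltage_jolt_buttons_py_alt jolts buttons
  unfold find_joltage_jolt_buttons_py find_joltage_jolt_buttons_py_alt
  set n := jolts.length with hn
  have hinit : (jolts.map (fun _ => ([] : List (List Int)))).length = n := by simp [hn]
  have hA := pvA_fold (fun j => pvAInner buttons j) jolts 0
      (jolts.map (fun _ => ([] : List (List Int)))) (by simp)
  simp only [Int.natCast_zero] at hA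
  rw [hA]
  apply List.ext_getElem?
  intro k
  simp only [List.take_zero, List.nil_append]
  by_cases hk : k < n
  · rw [pvB_outer n buttons _ k hk]
    have hl : (jolts.map (fun _ => ([] : List (List Int))))[k]? = some [] := by
      rw [List.getElem?_map, List.getElem?_eq_getElem (by omega)]
      simp
    rw [hl]
    have hr : ((List.range' 0 n).map (fun j : Nat => pvAInner buttons (Int.ofNat j)))[k]?
        = some (pvAInner buttons (Int.ofNat k)) := by
      rw [List.getElem?_map, List.getElem?_range' hk]
      simp
    rw [hr]
    simp [pvAInner_eq]
  · have h1 : ((List.range' 0 n).map (fun j : Nat => pvAInner buttons (Int.ofNat j)))[k]? = none := by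
      apply List.getElem?_eq_none
      simp; omega
    have h2 : (buttons.foldl
        (fun res btn =>
          (PySem.List.dedup btn).foldl
            (fun r j => if 0 ≤ j ∧ j < (n : Int) then r.modify j.toNat (· ++ [btn]) else r) res)
        (jolts.map (fun _ => ([] : List (List Int)))))[k]? = none := by
      apply List.getElem?_eq_none
      rw [pvB_outer_len, hinit]; omega
    rw [h1, h2]
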